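-- pv_equiv track=rewrite | github.com/Betanu701/atlas-cortex | cortex/avatar/visemes.py | _text_to_phonemes
-- ===== SOURCE A (Python) =====
-- _DIGRAPH_MAP: list[tuple[str, str]] = [
--     ("th", "T"), ("sh", "S"), ("ch", "S"), ("ph", "f"),
--     ("wh", "w"), ("ck", "k"), ("ng", "n"), ("qu", "k"),
-- ]
--
-- _CHAR_PHONEME: dict[str, str] = {
--     "a": "a", "b": "b", "c": "k", "d": "d", "e": "e",
--     "f": "f", "g": "g", "h": "sil", "i": "i", "j": "j",
--     "k": "k", "l": "l", "m": "m", "n": "n", "o": "o",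
--     "p": "p", "q": "k", "r": "r", "s": "s", "t": "t",
--     "u": "u", "v": "v", "w": "w", "x": "k", "y": "i",
--     "z": "z",
-- }
--
-- def _text_to_phonemes(text: str) -> list[str]:
--     """Convert text to a rough phoneme sequence using character heuristics."""
--     text = text.lower().strip()
--     phonemes: list[str] = []
--     i = 0
--     while i < len(text):
--         ch = text[i]
--         if not ch.isalpha():
--             if not phonemes or phonemes[-1] != "sil":
--                 phonemes.append("sil")
--             i += 1
--             continue
--         matched = False
--         if i + 1 < len(text):
--             pair = text[i : i + 2]
--             for digraph, phoneme in _DIGRAPH_MAP: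
--                 if pair == digraph:
--                     phonemes.append(phoneme)
--                     i += 2
--                     matched = True
--                     break
--         if not matched:
--             phonemes.append(_CHAR_PHONEME.get(ch, "sil"))
--             i += 1
--     return phonemes
-- ===== SOURCE B (Python) =====
-- import re
--
-- _DIGRAPHS: dict[str, str] = {
--     "th": "T", "sh": "S", "ch": "S", "ph": "f",
--     "wh": "w", "ck": "k", "ng": "n", "qu": "k",
-- }
--
-- _CHAR_PHONEME: dict[str, str] = {
--     "a": "a", "b": "b", "c": "k", "d": "d", "e": "e",
--     "f": "f", "g": "g", "h": "sil", "i": "i", "j": "j",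
--     "k": "k", "l": "l", "m": "m", "n": "n", "o": "o",
--     "p": "p", "q": "k", "r": "r", "s": "s", "t": "t",
--     "u": "u", "v": "v", "w": "w", "x": "k", "y": "i",
--     "z": "z",
-- }
--
-- # Digraphs first so they win over single letters; "[^a-z]+" grabs whole
-- # non-letter runs as one token.
-- _TOKEN_RE = re.compile("|".join(_DIGRAPHS) + "|[a-z]|[^a-z]+")
--
-- def _text_to_phonemes(text: str) -> list[str]:
--     """Convert text to a rough phoneme sequence using character heuristics."""
--     phonemes: list[str] = []
--     for m in _TOKEN_RE.finditer(text.lower().strip()):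
--         tok = m.group()
--         if not ("a" <= tok[0] <= "z"):
--             if not phonemes or phonemes[-1] != "sil":
--                 phonemes.append("sil")
--         elif len(tok) == 2:
--             phonemes.append(_DIGRAPHS[tok])
--         else:
--             phonemes.append(_CHAR_PHONEME[tok])
--     return phonemes
-- ===== Notes on version B (the rewrite author's own statement) =====
-- stated objective: idiomatic
-- what changed: Replaces A's index-stepping while loop with per-character branching by a regex tokenizer (digraph|letter|non-letter-run alternation via re.finditer) followed by a single token-to-phoneme mapping loop.
import Mathlib
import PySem

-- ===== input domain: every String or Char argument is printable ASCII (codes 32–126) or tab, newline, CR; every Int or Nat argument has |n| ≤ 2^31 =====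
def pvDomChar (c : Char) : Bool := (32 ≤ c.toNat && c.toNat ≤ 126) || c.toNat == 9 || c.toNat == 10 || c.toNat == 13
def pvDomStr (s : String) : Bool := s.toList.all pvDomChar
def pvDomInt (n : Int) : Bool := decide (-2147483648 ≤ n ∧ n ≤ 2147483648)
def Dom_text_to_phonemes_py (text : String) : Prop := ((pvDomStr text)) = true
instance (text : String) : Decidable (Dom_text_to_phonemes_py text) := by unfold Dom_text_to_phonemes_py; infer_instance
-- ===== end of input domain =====

-- B replaces A's index-stepping while loop by a regex-style tokenizer (digraphs | letter | non-letter run)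
-- followed by a single fold mapping tokens to phonemes; objective: idiomatic. Return values agree on Dom.

-- ===== PORT A =====
-- _DIGRAPH_MAP (A iterates this list in order)
def pvDigraphs : List (String × String) :=
  [("th", "T"), ("sh", "S"), ("ch", "S"), ("ph", "f"),
   ("wh", "w"), ("ck", "k"), ("ng", "n"), ("qu", "k")]

-- _CHAR_PHONEME (the same module constant; both Pythons carry it verbatim)
def pvCharPhoneme : PySem.Dict String String := PySem.Dict.ofList
  [("a", "a"), ("b", "b"), ("c", "k"), ("d", "d"), ("e", "e"),
   ("f", "f"), ("g", "g"), ("h", "sil"), ("i", "i"), ("j", "j"),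
   ("k", "k"), ("l", "l"), ("m", "m"), ("n", "n"), ("o", "o"),
   ("p", "p"), ("q", "k"), ("r", "r"), ("s", "s"), ("t", "t"),
   ("u", "u"), ("v", "v"), ("w", "w"), ("x", "k"), ("y", "i"),
   ("z", "z")]

-- A's while loop over index i, transcribed as structural recursion on the remaining characters;
-- the inner 'for digraph, phoneme in _DIGRAPH_MAP: if pair == digraph: … break' is List.find?.
def pvALoop : List Char → List String → List String
  | [], acc => acc
  | c :: rest, acc =>
    if PySem.Chars.isalpha c = false then
      pvALoop rest (if acc = [] ∨ acc.getLast? ≠ some "sil" then acc ++ ["sil"] else acc)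
    else
      match rest with
      | c2 :: rest2 =>
        match pvDigraphs.find? (fun dp => String.ofList [c, c2] == dp.1) with
        | some dp => pvALoop rest2 (acc ++ [dp.2])
        | none => pvALoop (c2 :: rest2) (acc ++ [PySem.Dict.getD pvCharPhoneme (String.ofList [c]) "sil"])
      | [] => pvALoop [] (acc ++ [PySem.Dict.getD pvCharPhoneme (String.ofList [c]) "sil"])
termination_by cs _ => cs.length

def text_to_phonemes_py (text : String) : List String :=
  pvALoop (PySem.Str.strip (PySem.Str.lower text)).toList []

-- ===== PORT B =====
-- _DIGRAPHS dict of Source B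
def pvDigraphDict : PySem.Dict String String := PySem.Dict.ofList
  [("th", "T"), ("sh", "S"), ("ch", "S"), ("ph", "f"),
   ("wh", "w"), ("ck", "k"), ("ng", "n"), ("qu", "k")]

-- hand port of re.finditer over the alternation "th|sh|…|qu|[a-z]|[^a-z]+": at each position the
-- engine first tries the digraphs (order irrelevant for a membership test, keys distinct), then a
-- single [a-z], then a maximal non-letter run; exact for this regex on any input string.
def pvTokenize : List Char → List (List Char)
  | [] => []
  | c :: rest =>
    if PySem.Chars.islower c then
      match rest with
      | c2 :: rest2 =>
        if pvDigraphDict.contains (String.ofList [c, c2]) then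
          [c, c2] :: pvTokenize rest2
        else
          [c] :: pvTokenize (c2 :: rest2)
      | [] => [[c]]
    else
      (c :: rest.takeWhile (fun d => !PySem.Chars.islower d)) ::
        pvTokenize (rest.dropWhile (fun d => !PySem.Chars.islower d))
termination_by cs => cs.length
decreasing_by
  · simp
  · simp
  · have := List.length_dropWhile_le (fun d => !PySem.Chars.islower d) rest
    simp
    omega

-- the body of Source B's for-loop (Source B's dict subscripts are getD: tokenize guarantees the key is present)
def pvStep (acc : List String) (tok : List Char) : List String :=
  match tok with
  | [] => acc
  | c :: _ =>
    if PySem.Chars.islower c = false then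
      if acc = [] ∨ acc.getLast? ≠ some "sil" then acc ++ ["sil"] else acc
    else if tok.length = 2 then
      acc ++ [PySem.Dict.getD pvDigraphDict (String.ofList tok) "sil"]
    else
      acc ++ [PySem.Dict.getD pvCharPhoneme (String.ofList tok) "sil"]

def text_to_phonemes_py_alt (text : String) : List String :=
  (pvTokenize (PySem.Str.strip (PySem.Str.lower text)).toList).foldl pvStep []

-- ===== PRECONDITION & SPEC =====
def Spec_text_to_phonemes_py (text : String) (out : List String) : Prop := out = text_to_phonemes_py_alt text
instance (text : String) (out : List String) : Decidable (Spec_text_to_phonemes_py text out) := by unfold Spec_text_to_phonemes_py; infer_instance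

-- ===== CLAIM (what is proved, stated in full; the proofs are below) =====
def Claim_equal_text_to_phonemes_py : Prop := ∀ (text : String), Dom_text_to_phonemes_py text → Spec_text_to_phonemes_py text (text_to_phonemes_py text)

-- ===== LEMMAS AND PROOFS =====

-- lowering never yields an upper-case ASCII letter
lemma pvIsupperLower (c : Char) : PySem.Chars.isupper (PySem.Chars.lowerChar c) = false := by
  unfold PySem.Chars.lowerChar PySem.Chars.isupper
  by_cases hc : (decide ('A' ≤ c) && decide (c ≤ 'Z')) = true
  · simp only [hc, if_true]
    simp only [Bool.and_eq_true, decide_eq_true_eq, Char.le_def,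
      UInt32.le_iff_toNat_le] at hc ⊢
    obtain ⟨h1, h2⟩ := hc
    have hA : ('A' : Char).val.toNat = 65 := by decide
    have hZ : ('Z' : Char).val.toNat = 90 := by decide
    have hval : (c.toNat + 32).isValidChar := by
      constructor
      · show c.toNat + 32 < 0xD800
        unfold Char.toNat; omega
    have : (Char.ofNat (c.toNat + 32)).toNat = c.toNat + 32 := by
      rw [Char.toNat_ofNat, if_pos hval]
    unfold Char.toNat at *
    simp only [Bool.and_eq_false_iff, decide_eq_false_iff_not, not_le]
    omega
  · simp only [hc]
    simpa using hc

-- after a "sil" step the last phoneme is "sil"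
lemma pvSilLast (acc : List String) :
    (if acc = [] ∨ acc.getLast? ≠ some "sil" then acc ++ ["sil"] else acc).getLast? = some "sil" := by
  split_ifs with h
  · simp
  · rw [not_or, not_not] at h
    exact h.2

-- A absorbs a run of non-letters when the last phoneme is already "sil"
lemma pvSilRun (run : List Char) (rest : List Char) (acc : List String)
    (hrun : ∀ c ∈ run, PySem.Chars.isalpha c = false)
    (hacc : acc.getLast? = some "sil") :
    pvALoop (run ++ rest) acc = pvALoop rest acc := by
  induction run with
  | nil => rfl
  | cons c t ih =>
    have h1 : PySem.Chars.isalpha c = false := hrun c List.mem_cons_self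
    have hne : acc ≠ [] := by intro e; subst e; simp at hacc
    have hcond : ¬ (acc = [] ∨ acc.getLast? ≠ some "sil") := by
      rw [not_or, not_not]; exact ⟨hne, hacc⟩
    show pvALoop (c :: (t ++ rest)) acc = pvALoop rest acc
    rw [pvALoop.eq_def]
    simp only [h1, if_true, if_neg hcond]
    exact ih (fun d hd => hrun d (List.mem_cons_of_mem _ hd))

-- the digraph dict of B read off A's find? over the digraph list
lemma pvDigSome (s : String) (dp : String × String)
    (h : pvDigraphs.find? (fun x => s == x.1) = some dp) :
    pvDigraphDict.contains s = true ∧ PySem.Dict.getD pvDigraphDict s "sil" = dp.2 := by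
  simp only [pvDigraphs, List.find?] at h
  repeat' split at h
  all_goals try (rename_i heq; rw [beq_iff_eq] at heq; subst heq)
  all_goals cases h
  all_goals decide

lemma pvDigNone (s : String) (h : pvDigraphs.find? (fun x => s == x.1) = none) :
    pvDigraphDict.contains s = false := by
  simp only [pvDigraphs, List.find?] at h
  repeat' split at h
  all_goals cases h
  have hi : pvDigraphDict.items = [("th", "T"), ("sh", "S"), ("ch", "S"), ("ph", "f"),
    ("wh", "w"), ("ck", "k"), ("ng", "n"), ("qu", "k")] := rfl
  simp only [PySem.Dict.contains, hi, List.any_cons, List.any_nil, Bool.or_eq_false_iff,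
    beq_eq_false_iff_ne, ne_eq]
  and_intros <;> first | trivial | (intro e; subst e; simp_all)

-- main loop correspondence, on strings without upper-case ASCII letters
lemma pvMain (n : Nat) : ∀ (cs : List Char), cs.length ≤ n →
    (∀ c ∈ cs, PySem.Chars.isupper c = false) →
    ∀ acc, pvALoop cs acc = (pvTokenize cs).foldl pvStep acc := by
  induction n with
  | zero =>
    intro cs hlen _ acc
    have : cs = [] := List.eq_nil_of_length_eq_zero (Nat.le_zero.mp hlen)
    subst this; simp [pvALoop, pvTokenize]
  | succ n ih =>
    intro cs hlen hU acc
    match cs with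
    | [] => simp [pvALoop, pvTokenize]
    | c :: rest =>
      have hUc : PySem.Chars.isupper c = false := hU c List.mem_cons_self
      have hUrest : ∀ d ∈ rest, PySem.Chars.isupper d = false :=
        fun d hd => hU d (List.mem_cons_of_mem _ hd)
      have hlen' : rest.length ≤ n := by simp at hlen; omega
      by_cases hl : PySem.Chars.islower c
      · have ha : PySem.Chars.isalpha c = true := by
          simp [PySem.Chars.isalpha, hl]
        match rest with
        | [] =>
          rw [pvALoop.eq_def, pvTokenize.eq_def]
          simp [ha, hl, pvStep, pvALoop]
        | c2 :: rest2 =>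
          have hlen2 : rest2.length ≤ n := by simp at hlen; omega
          have hUrest2 : ∀ d ∈ rest2, PySem.Chars.isupper d = false :=
            fun d hd => hUrest d (List.mem_cons_of_mem _ hd)
          rw [pvALoop.eq_def, pvTokenize.eq_def]
          cases hfind : pvDigraphs.find? (fun dp => String.ofList [c, c2] == dp.1) with
          | some dp =>
            obtain ⟨hcont, hget⟩ := pvDigSome _ _ hfind
            simp only [ha, hl, hfind, hcont]
            simp only [Bool.true_eq_false, if_false, if_true, List.foldl_cons]
            rw [show pvStep acc [c, c2] = acc ++ [dp.2] by
              simp [pvStep, hl, hget]]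
            exact ih rest2 hlen2 hUrest2 _
          | none =>
            have hcont := pvDigNone _ hfind
            simp only [ha, hl, hfind, hcont]
            simp only [Bool.true_eq_false, Bool.false_eq_true, if_false, if_true, List.foldl_cons]
            rw [show pvStep acc [c] = acc ++ [PySem.Dict.getD pvCharPhoneme (String.ofList [c]) "sil"] by
              simp [pvStep, hl]]
            exact ih (c2 :: rest2) hlen' hUrest _
      · have ha : PySem.Chars.isalpha c = false := by
          simp [PySem.Chars.isalpha, hUc, hl]
        have hlb : PySem.Chars.islower c = false := by simpa using hl
        rw [pvALoop.eq_def, pvTokenize.eq_def]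
        simp only [ha, hlb]
        simp only [Bool.false_eq_true, if_false, if_true, List.foldl_cons]
        rw [show pvStep acc (c :: rest.takeWhile (fun d => !PySem.Chars.islower d)) =
            (if acc = [] ∨ acc.getLast? ≠ some "sil" then acc ++ ["sil"] else acc) by
          simp [pvStep, hlb]]
        set acc' := if acc = [] ∨ acc.getLast? ≠ some "sil" then acc ++ ["sil"] else acc with hacc'
        have hsplit : rest = rest.takeWhile (fun d => !PySem.Chars.islower d) ++
            rest.dropWhile (fun d => !PySem.Chars.islower d) :=
          (List.takeWhile_append_dropWhile).symm
        conv_lhs => rw [hsplit]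
        rw [pvSilRun _ _ acc'
          (by
            intro d hd
            have hdl := List.mem_takeWhile_imp hd
            have hdr : d ∈ rest := (List.takeWhile_sublist _).subset hd
            simp only [Bool.not_eq_eq_eq_not, Bool.not_true] at hdl
            simp [PySem.Chars.isalpha, hUrest d hdr, hdl])
          (pvSilLast acc)]
        refine ih _ ?_ ?_ acc'
        · exact le_trans (List.length_dropWhile_le _ _) hlen'
        · exact fun d hd => hUrest d ((List.dropWhile_sublist _).subset hd)

-- ===== VERDICT (by name: the statement is the Claim_ definition above) =====
theorem text_to_phonemes_py_spec : Claim_equal_text_to_phonemes_py := by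
  intro text _
  unfold Spec_text_to_phonemes_py text_to_phonemes_py text_to_phonemes_py_alt
  apply pvMain (PySem.Str.strip (PySem.Str.lower text)).toList.length _ le_rfl
  intro c hc
  rw [PySem.Str.toList_strip, PySem.Str.toList_lower] at hc
  unfold PySem.Chars.strip PySem.Chars.rstrip PySem.Chars.lstrip at hc
  rw [List.mem_reverse] at hc
  have hc2 := (List.dropWhile_sublist _).subset hc
  rw [List.mem_reverse] at hc2
  have hc3 := (List.dropWhile_sublist _).subset hc2
  obtain ⟨d, _, rfl⟩ := List.mem_map.mp hc3
  exact pvIsupperLower d
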